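-- pv_equiv track=rewrite | github.com/IshanMadusanka13/CTSE_Assignement02 | tools/report_generator_tool.py | generate_severity_heatmap
-- ===== SOURCE A (Python) =====
-- from typing import Dict, List, Any
--
-- def generate_severity_heatmap(all_issues: List[Dict[str, Any]]) -> str:
--     """
--     Generate text-based issue density heatmap by line range.
--
--     Args:
--         all_issues: Combined issues/vulnerabilities list
--
--     Returns:
--         Multi-line heatmap string.
--     """
--
--     ranges = {
--         "1-50": 0,
--         "51-100": 0,
--         "101-150": 0,
--         "151-200": 0,
--         "201+": 0,
--     }
--
--     for issue in all_issues:
--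
--         line = issue.get("line", 1)
--
--         if line <= 50:
--             ranges["1-50"] += 1
--
--         elif line <= 100:
--             ranges["51-100"] += 1
--
--         elif line <= 150:
--             ranges["101-150"] += 1
--
--         elif line <= 200:
--             ranges["151-200"] += 1
--
--         else:
--             ranges["201+"] += 1
--
--     heatmap = ""
--
--     for key, value in ranges.items():
--         heatmap += f"{key:<10} : {'█' * value} ({value} issues)\n"
--
--     return heatmap
-- ===== SOURCE B (Python) =====
-- from typing import Dict, List, Any
--
-- LABELS = ["1-50", "51-100", "101-150", "151-200", "201+"]
--
--
-- def generate_severity_heatmap(all_issues: List[Dict[str, Any]]) -> str: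
--     """Staged computation: extract the line numbers once, compute the
--     cumulative count of lines <= each boundary, and take successive
--     differences of the cumulative counts to obtain the per-range counts
--     (no single-pass bucketing, no if/elif ladder)."""
--     lines = [issue.get("line", 1) for issue in all_issues]
--     cum = [sum(1 for l in lines if l <= b) for b in (50, 100, 150, 200)]
--     cum.append(len(lines))
--     counts = [c - p for c, p in zip(cum, [0] + cum[:-1])]
--     return "".join(
--         f"{label:<10} : {'█' * c} ({c} issues)\n"
--         for label, c in zip(LABELS, counts)
--     )
-- ===== Notes on version B (the rewrite author's own statement) =====
-- stated objective: alternative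
-- what changed: Instead of A's single pass that dispatches each issue through an if/elif ladder into a dict of five named counters, B extracts the line numbers once, computes for each boundary the cumulative count of lines <= that boundary (four filtered counting passes plus the total length), and derives the per-range counts as successive differences of the cumulative counts; the output is joined from zip(labels, counts).
import Mathlib
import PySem

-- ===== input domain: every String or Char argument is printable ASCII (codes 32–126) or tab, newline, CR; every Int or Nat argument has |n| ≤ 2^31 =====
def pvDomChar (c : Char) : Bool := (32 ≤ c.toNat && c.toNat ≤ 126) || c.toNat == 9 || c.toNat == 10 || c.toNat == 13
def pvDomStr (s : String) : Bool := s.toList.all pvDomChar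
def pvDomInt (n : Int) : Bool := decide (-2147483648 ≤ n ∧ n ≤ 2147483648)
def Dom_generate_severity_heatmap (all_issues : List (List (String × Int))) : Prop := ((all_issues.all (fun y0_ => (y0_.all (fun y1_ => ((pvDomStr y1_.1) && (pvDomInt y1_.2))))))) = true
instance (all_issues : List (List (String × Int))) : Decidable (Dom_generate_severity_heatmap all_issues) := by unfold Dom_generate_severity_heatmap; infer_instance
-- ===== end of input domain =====

-- B replaces A's single-pass if/elif bucketing into a dict of counters by staged
-- passes: cumulative counts of lines ≤ each boundary, then successive differences
-- (alternative decomposition, same cost).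

-- shared helpers (both Pythons call issue.get("line", 1) and render the identical f-string)
-- issue.get(k, dflt): first match in the association list (exact for a Python dict)
def pvGet (issue : List (String × Int)) (k : String) (dflt : Int) : Int :=
  match issue.find? (fun p => p.1 == k) with
  | some p => p.2
  | none => dflt

-- f"{key:<10} : {'█' * value} ({value} issues)\n"  (exact: keys here are shorter than 10;
-- '█' * v is empty for v ≤ 0, matching Python)
def pvFmt (key : String) (value : Int) : String :=
  key ++ String.ofList (List.replicate (10 - key.length) ' ') ++ " : "
      ++ String.ofList (List.replicate value.toNat '█') ++ " ("
      ++ PySem.Int.toStr value ++ " issues)\n"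

-- ===== PORT A =====
def generate_severity_heatmap (all_issues : List (List (String × Int))) : String :=
  let ranges : PySem.Dict String Int :=
    ((((PySem.Dict.empty.insert "1-50" 0).insert "51-100" 0).insert "101-150" 0).insert
        "151-200" 0).insert "201+" 0
  let ranges := all_issues.foldl (fun r issue =>
      let line := pvGet issue "line" 1
      if line ≤ 50 then r.modify "1-50" 0 (· + 1)
      else if line ≤ 100 then r.modify "51-100" 0 (· + 1)
      else if line ≤ 150 then r.modify "101-150" 0 (· + 1)
      else if line ≤ 200 then r.modify "151-200" 0 (· + 1)
      else r.modify "201+" 0 (· + 1)) ranges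
  ranges.items.foldl (fun heatmap kv => heatmap ++ pvFmt kv.1 kv.2) ""

-- ===== PORT B =====
def pvLabels : List String := ["1-50", "51-100", "101-150", "151-200", "201+"]

-- sum(1 for l in lines if l <= b), transcribed as the fold it performs
def pvCntLe (b : Int) (lines : List Int) : Int :=
  lines.foldl (fun s l => if l ≤ b then s + 1 else s) 0

def generate_severity_heatmap_alt (all_issues : List (List (String × Int))) : String :=
  let lines := all_issues.map (fun issue => pvGet issue "line" 1)
  let cum := ([50, 100, 150, 200] : List Int).map (fun b => pvCntLe b lines)
  let cum := cum ++ [(lines.length : Int)]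
  let counts := (cum.zip ((0 : Int) :: cum.dropLast)).map (fun p => p.1 - p.2)
  String.join ((pvLabels.zip counts).map (fun p => pvFmt p.1 p.2))

-- ===== PRECONDITION & SPEC =====
def Spec_generate_severity_heatmap (all_issues : List (List (String × Int))) (out : String) : Prop := out = generate_severity_heatmap_alt all_issues
instance (all_issues : List (List (String × Int))) (out : String) : Decidable (Spec_generate_severity_heatmap all_issues out) := by unfold Spec_generate_severity_heatmap; infer_instance

-- ===== CLAIM (what is proved, stated in full; the proofs are below) =====
def Claim_equal_generate_severity_heatmap : Prop := ∀ (all_issues : List (List (String × Int))), Dom_generate_severity_heatmap all_issues → Spec_generate_severity_heatmap all_issues (generate_severity_heatmap all_issues)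

-- ===== LEMMAS AND PROOFS =====

-- the dict A maintains, as a function of its five counter values
def pvMkD (a b c d e : Int) : PySem.Dict String Int :=
  ((((PySem.Dict.empty.insert "1-50" a).insert "51-100" b).insert "101-150" c).insert
      "151-200" d).insert "201+" e

lemma pvMkD_items (a b c d e : Int) :
    (pvMkD a b c d e).items =
      [("1-50", a), ("51-100", b), ("101-150", c), ("151-200", d), ("201+", e)] := rfl

-- shifting the start value out of the counting fold
lemma pvCntLe_shift (b : Int) : ∀ (ls : List Int) (s : Int),
    ls.foldl (fun s l => if l ≤ b then s + 1 else s) s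
      = s + ls.foldl (fun s l => if l ≤ b then s + 1 else s) 0 := by
  intro ls
  induction ls with
  | nil => intro s; simp
  | cons x xs ih =>
    intro s
    simp only [List.foldl_cons]
    rw [ih, ih (if x ≤ b then 0 + 1 else 0)]
    split_ifs <;> omega

lemma pvCntLe_cons (b x : Int) (xs : List Int) :
    pvCntLe b (x :: xs) = (if x ≤ b then 1 else 0) + pvCntLe b xs := by
  simp only [pvCntLe, List.foldl_cons]
  rw [pvCntLe_shift]
  split_ifs <;> omega

-- A's fold over the issues, expressed through B's cumulative counts
lemma pv_fold_eq (issues : List (List (String × Int))) :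
    ∀ a b c d e : Int,
      (issues.foldl (fun r issue =>
        let line := pvGet issue "line" 1
        if line ≤ 50 then r.modify "1-50" 0 (· + 1)
        else if line ≤ 100 then r.modify "51-100" 0 (· + 1)
        else if line ≤ 150 then r.modify "101-150" 0 (· + 1)
        else if line ≤ 200 then r.modify "151-200" 0 (· + 1)
        else r.modify "201+" 0 (· + 1)) (pvMkD a b c d e)) =
      (let lines := issues.map (fun issue => pvGet issue "line" 1)
       pvMkD (a + pvCntLe 50 lines)
             (b + (pvCntLe 100 lines - pvCntLe 50 lines))
             (c + (pvCntLe 150 lines - pvCntLe 100 lines))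
             (d + (pvCntLe 200 lines - pvCntLe 150 lines))
             (e + ((lines.length : Int) - pvCntLe 200 lines))) := by
  induction issues with
  | nil => intro a b c d e; simp [pvCntLe]
  | cons issue rest ih =>
    intro a b c d e
    simp only [List.foldl_cons, List.map_cons]
    set line := pvGet issue "line" 1 with hline
    have hs : ∀ bnd : Int,
        pvCntLe bnd (line :: rest.map (fun issue => pvGet issue "line" 1)) =
        (if line ≤ bnd then 1 else 0) + pvCntLe bnd (rest.map (fun issue => pvGet issue "line" 1)) :=
      fun bnd => pvCntLe_cons bnd line _
    by_cases h1 : line ≤ 50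
    · have hA : (pvMkD a b c d e).modify "1-50" 0 (· + 1) = pvMkD (a + 1) b c d e := rfl
      simp only [if_pos h1, hA, ih]
      simp only [hs, List.length_cons]
      congr 1 <;> split_ifs <;> push_cast <;> omega
    · by_cases h2 : line ≤ 100
      · have hA : (pvMkD a b c d e).modify "51-100" 0 (· + 1) = pvMkD a (b + 1) c d e := rfl
        simp only [if_neg h1, if_pos h2, hA, ih]
        simp only [hs, List.length_cons]
        congr 1 <;> split_ifs <;> push_cast <;> omega
      · by_cases h3 : line ≤ 150
        · have hA : (pvMkD a b c d e).modify "101-150" 0 (· + 1) = pvMkD a b (c + 1) d e := rfl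
          simp only [if_neg h1, if_neg h2, if_pos h3, hA, ih]
          simp only [hs, List.length_cons]
          congr 1 <;> split_ifs <;> push_cast <;> omega
        · by_cases h4 : line ≤ 200
          · have hA : (pvMkD a b c d e).modify "151-200" 0 (· + 1) = pvMkD a b c (d + 1) e := rfl
            simp only [if_neg h1, if_neg h2, if_neg h3, if_pos h4, hA, ih]
            simp only [hs, List.length_cons]
            congr 1 <;> split_ifs <;> push_cast <;> omega
          · have hA : (pvMkD a b c d e).modify "201+" 0 (· + 1) = pvMkD a b c d (e + 1) := rfl
            simp only [if_neg h1, if_neg h2, if_neg h3, if_neg h4, hA, ih]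
            simp only [hs, List.length_cons]
            congr 1 <;> split_ifs <;> push_cast <;> omega

-- shifting the accumulator out of a string-append fold
lemma pv_strfold_shift : ∀ (l : List String) (s : String),
    l.foldl (· ++ ·) s = s ++ l.foldl (· ++ ·) "" := by
  intro l
  induction l with
  | nil => intro s; simp
  | cons x xs ih =>
    intro s
    simp only [List.foldl_cons]
    rw [ih ("" ++ x), ih (s ++ x)]
    simp [String.append_assoc]

-- A's string concatenation over a list equals prefix ++ join of the per-item strings
lemma pv_foldl_append_join (f : String × Int → String) :
    ∀ (l : List (String × Int)) (s : String),
      l.foldl (fun h kv => h ++ f kv) s = s ++ String.join (l.map f) := by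
  intro l
  induction l with
  | nil => intro s; simp [String.join]
  | cons x xs ih =>
    intro s
    simp only [List.foldl_cons, List.map_cons, String.join, List.foldl_cons, ih]
    rw [pv_strfold_shift (List.map f xs) ("" ++ f x)]
    simp [String.append_assoc]

-- ===== VERDICT (by name: the statement is the Claim_ definition above) =====
theorem generate_severity_heatmap_spec : Claim_equal_generate_severity_heatmap := by
  intro all_issues _
  have h := pv_fold_eq all_issues 0 0 0 0 0
  simp only [pvMkD] at h
  simp only [Spec_generate_severity_heatmap, generate_severity_heatmap,
    generate_severity_heatmap_alt]
  rw [h, pv_foldl_append_join (fun p => pvFmt p.1 p.2)]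
  have hitems := pvMkD_items
  simp only [pvMkD] at hitems
  simp only [hitems, pvLabels, List.dropLast, List.cons_append, List.nil_append,
    List.zip, List.zipWith, List.map_cons, List.map_nil, List.length_map, zero_add]
  simp only [String.join]
  simp
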